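-- pv_equiv track=rewrite | github.com/huangziwei/lmpy | benchmarks/bench.py | _split_csv_row
-- ===== SOURCE A (Python) =====
-- def _split_csv_row(line: str) -> list[tuple[str, bool]]:
--     """Parse one CSV line, returning (text, was_quoted) per field."""
--     fields: list[tuple[str, bool]] = []
--     buf: list[str] = []
--     in_quotes = False
--     field_quoted = False
--     i, n = 0, len(line)
--     while i < n:
--         ch = line[i]
--         if in_quotes:
--             if ch == '"':
--                 if i + 1 < n and line[i + 1] == '"':
--                     buf.append('"'); i += 2; continue
--                 in_quotes = False
--             else:
--                 buf.append(ch)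
--         else:
--             if ch == '"':
--                 in_quotes = True; field_quoted = True
--             elif ch == ",":
--                 fields.append(("".join(buf), field_quoted))
--                 buf.clear(); field_quoted = False
--             else:
--                 buf.append(ch)
--         i += 1
--     fields.append(("".join(buf), field_quoted))
--     return fields
-- ===== SOURCE B (Python) =====
-- def _split_csv_row(line: str) -> list[tuple[str, bool]]:
--     """Parse one CSV line, returning (text, was_quoted) per field.
--
--     Two-phase: first cut the line at top-level commas into raw field
--     segments (quote chars kept), then transform each segment."""
--     # Phase 1: segment at top-level commas.
--     raws = []
--     cur = []
--     in_q = False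
--     i, n = 0, len(line)
--     while i < n:
--         ch = line[i]
--         if ch == '"':
--             if in_q and i + 1 < n and line[i + 1] == '"':
--                 cur.append('""'); i += 2; continue
--             in_q = not in_q
--             cur.append(ch)
--         elif ch == ',' and not in_q:
--             raws.append("".join(cur)); cur = []
--         else:
--             cur.append(ch)
--         i += 1
--     raws.append("".join(cur))
--     # Phase 2: per segment, quoted flag + unescape.
--     out = []
--     for raw in raws:
--         quoted = '"' in raw
--         text = []
--         in_q = False
--         j, m = 0, len(raw)
--         while j < m:
--             c = raw[j]
--             if c == '"':
--                 if in_q and j + 1 < m and raw[j + 1] == '"':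
--                     text.append('"'); j += 2; continue
--                 in_q = not in_q
--             else:
--                 text.append(c)
--             j += 1
--         out.append(("".join(text), quoted))
--     return out
-- ===== Notes on version B (the rewrite author's own statement) =====
-- stated objective: alternative
-- what changed: A's single fused state machine that builds unescaped field text, quoted flag and field list in one pass is replaced by a two-phase pipeline: a linear scan that only cuts the line at top-level commas into raw segments (keeping quote characters), followed by a per-segment map computing quoted = ('"' in raw) and a small unescape loop.
import Mathlib
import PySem

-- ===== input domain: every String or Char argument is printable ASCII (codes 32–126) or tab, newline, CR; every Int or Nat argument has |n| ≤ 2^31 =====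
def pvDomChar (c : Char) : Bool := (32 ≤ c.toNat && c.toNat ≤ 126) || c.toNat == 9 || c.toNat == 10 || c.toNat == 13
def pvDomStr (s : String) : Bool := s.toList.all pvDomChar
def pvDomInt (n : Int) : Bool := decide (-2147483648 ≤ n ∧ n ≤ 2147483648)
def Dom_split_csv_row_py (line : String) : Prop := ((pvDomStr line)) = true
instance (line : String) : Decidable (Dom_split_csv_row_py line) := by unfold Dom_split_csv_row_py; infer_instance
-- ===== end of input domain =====

-- B replaces A's single fused CSV state machine by a two-phase decomposition
-- (segment the line at top-level commas first, then unescape each segment); alternative, not faster.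

-- ===== PORT A =====
-- A's while loop: one pass with state (buf, in_quotes, field_quoted); `line[i+1] == '"'`
-- is ported as `rest.head? = some '"'` and `i += 2` as `rest.tail`; fields.append is
-- ported as cons, the trailing append as the base case.
def loopA : List Char → List Char → Bool → Bool → List (String × Bool)
  | [], buf, _, fq => [(String.mk buf, fq)]
  | c :: rest, buf, inq, fq =>
    if inq then
      if c = '"' then
        if rest.head? = some '"' then loopA rest.tail (buf ++ ['"']) inq fq
        else loopA rest buf false fq
      else loopA rest (buf ++ [c]) inq fq
    else
      if c = '"' then loopA rest buf true true
      else if c = ',' then (String.mk buf, fq) :: loopA rest [] false false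
      else loopA rest (buf ++ [c]) false fq
termination_by cs buf inq fq => cs.length
decreasing_by all_goals (simp [List.length_tail]; try omega)

def split_csv_row_py (line : String) : List (String × Bool) :=
  loopA line.toList [] false false

-- ===== PORT B =====
-- Phase 1 of Source B: cut the line at top-level commas into raw segments (raws.append ported as cons).
def splitRaw : List Char → List Char → Bool → List (List Char)
  | [], cur, _ => [cur]
  | c :: rest, cur, inq =>
    if c = '"' then
      if inq = true ∧ rest.head? = some '"' then splitRaw rest.tail (cur ++ ['"', '"']) inq
      else splitRaw rest (cur ++ [c]) (!inq)
    else if c = ',' ∧ inq = false then cur :: splitRaw rest [] false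
    else splitRaw rest (cur ++ [c]) inq
termination_by cs cur inq => cs.length
decreasing_by all_goals (simp [List.length_tail]; try omega)

-- Phase 2 of Source B: the per-segment unescape loop.
def unesc : List Char → List Char → Bool → List Char
  | [], text, _ => text
  | c :: rest, text, inq =>
    if c = '"' then
      if inq = true ∧ rest.head? = some '"' then unesc rest.tail (text ++ ['"']) inq
      else unesc rest text (!inq)
    else unesc rest (text ++ [c]) inq
termination_by cs text inq => cs.length
decreasing_by all_goals (simp [List.length_tail]; try omega)

def split_csv_row_py_alt (line : String) : List (String × Bool) :=
  (splitRaw line.toList [] false).map (fun r => (String.mk (unesc r [] false), r.contains '"'))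

-- ===== PRECONDITION & SPEC =====
def Spec_split_csv_row_py (line : String) (out : List (String × Bool)) : Prop := out = split_csv_row_py_alt line
instance (line : String) (out : List (String × Bool)) : Decidable (Spec_split_csv_row_py line out) := by unfold Spec_split_csv_row_py; infer_instance

-- ===== CLAIM (what is proved, stated in full; the proofs are below) =====
def Claim_equal_split_csv_row_py : Prop := ∀ (line : String), Dom_split_csv_row_py line → Spec_split_csv_row_py line (split_csv_row_py line)

-- ===== LEMMAS AND PROOFS =====

theorem unesc_ne (c : Char) (rest t : List Char) (inq : Bool) (h : ¬ c = '"') :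
    unesc (c :: rest) t inq = unesc rest (t ++ [c]) inq := by
  simp [unesc, h]

theorem unesc_open (rest t : List Char) : unesc ('"' :: rest) t false = unesc rest t true := by
  simp [unesc]

theorem unesc_dbl (r2 t : List Char) : unesc ('"' :: '"' :: r2) t true = unesc r2 (t ++ ['"']) true := by
  simp [unesc]

theorem unesc_close (rest t : List Char) (h : rest.head? ≠ some '"') :
    unesc ('"' :: rest) t true = unesc rest t false := by
  simp [unesc, h]

theorem unesc_acc_aux (n : ℕ) : ∀ (cs : List Char), cs.length ≤ n → ∀ (t : List Char) (inq : Bool),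
    unesc cs t inq = t ++ unesc cs [] inq := by
  induction n with
  | zero =>
    intro cs h t inq
    have : cs = [] := by cases cs <;> simp at h ⊢
    subst this; simp [unesc]
  | succ n ih =>
    intro cs h t inq
    cases cs with
    | nil => simp [unesc]
    | cons c rest =>
      have hr : rest.length ≤ n := by simpa using h
      by_cases hc : c = '"'
      · subst hc
        cases inq with
        | false =>
          rw [unesc_open, unesc_open, ih rest hr t true, ih rest hr [] true]
        | true =>
          cases rest with
          | nil => simp [unesc]
          | cons a r =>
            by_cases ha : a = '"'
            · subst ha
              rw [unesc_dbl, unesc_dbl, ih r (by simp at hr; omega) (t ++ ['"']) true,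
                ih r (by simp at hr; omega) ([] ++ ['"']) true]
              simp
            · have hh : (a :: r).head? ≠ some '"' := by simpa using ha
              rw [unesc_close _ _ hh, unesc_close _ _ hh, ih (a :: r) hr t false,
                ih (a :: r) hr [] false]
      · rw [unesc_ne _ _ _ _ hc, unesc_ne _ _ _ _ hc, ih rest hr (t ++ [c]) inq,
          ih rest hr ([] ++ [c]) inq]
        simp

theorem unesc_acc (cs t : List Char) (inq : Bool) :
    unesc cs t inq = t ++ unesc cs [] inq :=
  unesc_acc_aux cs.length cs le_rfl t inq

theorem loopA_nil (buf : List Char) (inq fq : Bool) :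
    loopA [] buf inq fq = [(String.mk buf, fq)] := by
  simp [loopA]

theorem loopA_dbl (r2 buf : List Char) (fq : Bool) :
    loopA ('"' :: '"' :: r2) buf true fq = loopA r2 (buf ++ ['"']) true fq := by
  simp [loopA]

theorem loopA_close (rest buf : List Char) (fq : Bool) (h : rest.head? ≠ some '"') :
    loopA ('"' :: rest) buf true fq = loopA rest buf false fq := by
  simp [loopA, h]

theorem loopA_inq_ne (c : Char) (rest buf : List Char) (fq : Bool) (h : ¬ c = '"') :
    loopA (c :: rest) buf true fq = loopA rest (buf ++ [c]) true fq := by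
  simp [loopA, h]

theorem loopA_open (rest buf : List Char) (fq : Bool) :
    loopA ('"' :: rest) buf false fq = loopA rest buf true true := by
  simp [loopA]

theorem loopA_comma (rest buf : List Char) (fq : Bool) :
    loopA (',' :: rest) buf false fq = (String.mk buf, fq) :: loopA rest [] false false := by
  simp [loopA]

theorem loopA_other (c : Char) (rest buf : List Char) (fq : Bool) (hc : ¬ c = '"')
    (hcm : ¬ c = ',') :
    loopA (c :: rest) buf false fq = loopA rest (buf ++ [c]) false fq := by
  simp [loopA, hc, hcm]

theorem splitRaw_nil (cur : List Char) (inq : Bool) : splitRaw [] cur inq = [cur] := by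
  simp [splitRaw]

theorem splitRaw_dbl (r2 cur : List Char) :
    splitRaw ('"' :: '"' :: r2) cur true = splitRaw r2 (cur ++ ['"', '"']) true := by
  simp [splitRaw]

theorem splitRaw_close (rest cur : List Char) (h : rest.head? ≠ some '"') :
    splitRaw ('"' :: rest) cur true = splitRaw rest (cur ++ ['"']) false := by
  simp [splitRaw, h]

theorem splitRaw_inq_ne (c : Char) (rest cur : List Char) (h : ¬ c = '"') :
    splitRaw (c :: rest) cur true = splitRaw rest (cur ++ [c]) true := by
  simp [splitRaw, h]

theorem splitRaw_open (rest cur : List Char) :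
    splitRaw ('"' :: rest) cur false = splitRaw rest (cur ++ ['"']) true := by
  simp [splitRaw]

theorem splitRaw_comma (rest cur : List Char) :
    splitRaw (',' :: rest) cur false = cur :: splitRaw rest [] false := by
  simp [splitRaw]

theorem splitRaw_other (c : Char) (rest cur : List Char) (hc : ¬ c = '"') (hcm : ¬ c = ',') :
    splitRaw (c :: rest) cur false = splitRaw rest (cur ++ [c]) false := by
  simp [splitRaw, hc, hcm]

-- The master invariant linking A's fused machine to B's split-then-unescape pipeline.
-- g is a ghost flag, true when cur ends with a quote that just closed a quoted run: then
-- the unesc invariant is only claimed for continuations not starting with '"', and the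
-- next character of cs is known not to be '"'.
theorem master (n : ℕ) : ∀ (cs : List Char), cs.length ≤ n →
    ∀ (cur buf : List Char) (inq fq g : Bool),
    (inq = true → fq = true) →
    fq = cur.contains '"' →
    (g = true → cs.head? ≠ some '"') →
    (∀ tail : List Char, (g = true → tail.head? ≠ some '"') →
        unesc (cur ++ tail) [] false = buf ++ unesc tail [] inq) →
    loopA cs buf inq fq =
      (splitRaw cs cur inq).map (fun r => (String.mk (unesc r [] false), r.contains '"')) := by
  induction n with
  | zero =>
    intro cs h
    have : cs = [] := by cases cs <;> simp at h ⊢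
    subst this
    intro cur buf inq fq g h1 h2 h3 h4
    have hb := h4 [] (by simp)
    simp [unesc] at hb
    rw [loopA_nil, splitRaw_nil]
    simp [hb, h2]
  | succ n ih =>
    intro cs h cur buf inq fq g h1 h2 h3 h4
    cases cs with
    | nil =>
      have hb := h4 [] (by simp)
      simp [unesc] at hb
      rw [loopA_nil, splitRaw_nil]
      simp [hb, h2]
    | cons c rest =>
      have hr : rest.length ≤ n := by simpa using h
      cases inq with
      | false =>
        by_cases hc : c = '"'
        · -- opening quote
          subst hc
          rw [loopA_open, splitRaw_open]
          exact ih rest hr (cur ++ ['"']) buf true true false (fun _ => rfl)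
            (by simp) (by simp)
            (fun tail _ => by
              simp only [List.append_assoc, List.cons_append, List.nil_append]
              rw [h4 ('"' :: tail) (fun hgt => (h3 hgt (by simp)).elim), unesc_open])
        · by_cases hcm : c = ','
          · -- top-level comma
            subst hcm
            have hb := h4 [] (by simp)
            simp [unesc] at hb
            rw [loopA_comma, splitRaw_comma, List.map_cons]
            rw [ih rest hr [] [] false false false (by simp) (by simp) (by simp)
              (fun tail _ => by simp)]
            simp [hb, h2]
          · -- ordinary character, outside quotes
            rw [loopA_other _ _ _ _ hc hcm, splitRaw_other _ _ _ hc hcm]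
            exact ih rest hr (cur ++ [c]) (buf ++ [c]) false fq false (by simp)
              (by rw [h2]; simp [Ne.symm hc]) (by simp)
              (fun tail _ => by
                simp only [List.append_assoc, List.cons_append, List.nil_append]
                rw [h4 (c :: tail) (fun hgt => by simp [hc]), unesc_ne _ _ _ _ hc,
                  unesc_acc tail ([] ++ [c]) false]
                simp)
      | true =>
        have hfq : fq = true := h1 rfl
        subst hfq
        by_cases hc : c = '"'
        · subst hc
          have hng : ∀ tail : List Char, g = true → tail.head? ≠ some '"' :=
            fun tail hgt => (h3 hgt (by simp)).elim
          cases rest with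
          | nil =>
            -- unmatched closing quote at end of line
            have hb := h4 ['"'] (hng ['"'])
            rw [unesc_acc_aux 1 ['"'] (by simp) [] true] at hb
            simp [unesc] at hb
            rw [loopA_close _ _ _ (by simp), loopA_nil, splitRaw_close _ _ (by simp), splitRaw_nil]
            simp [hb, h2]
          | cons a r =>
            by_cases ha : a = '"'
            · -- escaped doubled quote inside quotes
              subst ha
              rw [loopA_dbl, splitRaw_dbl]
              exact ih r (by simp at hr; omega) (cur ++ ['"', '"']) (buf ++ ['"']) true true false
                (fun _ => rfl) (by simp) (by simp)
                (fun tail _ => by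
                  simp only [List.append_assoc, List.cons_append, List.nil_append]
                  rw [h4 ('"' :: '"' :: tail) (hng _), unesc_dbl,
                    unesc_acc tail ([] ++ ['"']) true]
                  simp)
            · -- closing quote (next char is not a quote)
              have hh : (a :: r).head? ≠ some '"' := by simpa using ha
              rw [loopA_close _ _ _ hh, splitRaw_close _ _ hh]
              exact ih (a :: r) hr (cur ++ ['"']) buf false true true (by simp)
                (by simp) (fun _ => hh)
                (fun tail htl => by
                  simp only [List.append_assoc, List.cons_append, List.nil_append]
                  rw [h4 ('"' :: tail) (hng _), unesc_close tail [] (htl rfl)])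
        · -- ordinary character, inside quotes
          rw [loopA_inq_ne _ _ _ _ hc, splitRaw_inq_ne _ _ _ hc]
          exact ih rest hr (cur ++ [c]) (buf ++ [c]) true true false (fun _ => rfl)
            (by rw [h2]; simp [Ne.symm hc]) (by simp)
            (fun tail _ => by
              simp only [List.append_assoc, List.cons_append, List.nil_append]
              rw [h4 (c :: tail) (fun hgt => by simp [hc]), unesc_ne _ _ _ _ hc,
                unesc_acc tail ([] ++ [c]) true]
              simp)

-- ===== VERDICT (by name: the statement is the Claim_ definition above) =====
theorem split_csv_row_py_spec : Claim_equal_split_csv_row_py := by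
  intro line _
  unfold Spec_split_csv_row_py split_csv_row_py split_csv_row_py_alt
  exact master line.toList.length line.toList le_rfl [] [] false false false
    (by simp) (by simp) (by simp) (fun tail _ => by simp)
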